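-- pv_equiv track=rewrite | github.com/pypi-data/pypi-mirror-364 | packages/excel-list-transform/excel_list_transform-0.8.2.tar.gz/excel_list_transform-0.8.2/src/excel_list_transform/row_split_merge.py | get_nosep_pos
-- ===== SOURCE A (Python) =====
-- def get_nosep_pos(instr: str,
--                   not_separators: list[str]) -> list[tuple[int, int]]:
--     """Find begin and end position of all not separators in input."""
--     nosep_pos: list[tuple[int, int]] = []
--     start = 0
--     found = True
--     lenstr = len(instr)
--     while found:
--         found = False
--         nsep_pos = (lenstr, 0)
--         for nsep in not_separators:
--             beg = instr.find(nsep, start)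
--             if beg >= 0:
--                 found = True
--                 end = beg + len(nsep)
--                 if beg < nsep_pos[0] or (beg == nsep_pos[0] and
--                                          end > nsep_pos[1]):
--                     nsep_pos = (beg, end)
--         if not found:
--             break
--         nosep_pos.append(nsep_pos)
--         start = nsep_pos[1]
--     return nosep_pos
-- ===== SOURCE B (Python) =====
-- def get_nosep_pos(instr: str,
--                   not_separators: list[str]) -> list[tuple[int, int]]:
--     """Find begin and end position of all not separators in input.
--
--     Single left-to-right scan: at each position take the longest
--     not-separator starting there (greedy leftmost-longest), instead of
--     re-running str.find for every pattern after each accepted span.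
--     """
--     n = len(instr)
--     result: list[tuple[int, int]] = []
--     i = 0
--     while i < n:
--         best = 0
--         for nsep in not_separators:
--             ln = len(nsep)
--             if ln > best and instr.startswith(nsep, i):
--                 best = ln
--         if best:
--             result.append((i, i + best))
--             i += best
--         else:
--             i += 1
--     return result
-- ===== Notes on version B (the rewrite author's own statement) =====
-- stated objective: faster
-- what changed: Replaced A's repeated rounds of per-pattern str.find (restarting the search after every accepted span) by a single left-to-right scan that takes the longest not-separator starting at each position (greedy leftmost-longest in one pass).
-- outside the precondition, e.g. on get_nosep_pos('ab', ['', 'ab']): A does not finish within the time limit, B returns [(0, 2)]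
import Mathlib
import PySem

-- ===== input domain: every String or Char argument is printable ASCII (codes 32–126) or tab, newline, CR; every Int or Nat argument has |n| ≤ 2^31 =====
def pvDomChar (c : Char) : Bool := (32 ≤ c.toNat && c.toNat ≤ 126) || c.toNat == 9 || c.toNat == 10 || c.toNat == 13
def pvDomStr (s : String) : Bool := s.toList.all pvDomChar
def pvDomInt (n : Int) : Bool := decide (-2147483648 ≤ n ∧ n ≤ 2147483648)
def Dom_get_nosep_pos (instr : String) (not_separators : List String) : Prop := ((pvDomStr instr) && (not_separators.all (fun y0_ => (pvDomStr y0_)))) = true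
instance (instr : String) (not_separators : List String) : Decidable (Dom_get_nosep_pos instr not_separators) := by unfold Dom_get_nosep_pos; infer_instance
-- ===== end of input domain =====

-- B replaces A's repeated per-pattern str.find rounds by a single left-to-right scan taking
-- the longest not-separator at each position; a timing run measured B faster on its inputs.


-- ===== PORT A =====
-- the 'while found' loop; start strictly increases each appended span (patterns nonempty
-- under Pre_), so fuel = len(instr)+1 rounds always suffice there
def get_nosep_pos_loop (instr : String) (not_separators : List String) (lenstr : Int) :
    Nat → Int → List (Int × Int) → List (Int × Int)
  | 0, _, nosep_pos => nosep_pos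
  | fuel + 1, start, nosep_pos =>
    let st := not_separators.foldl (fun (st : Bool × (Int × Int)) nsep =>
      let beg := PySem.Str.findFrom instr nsep start
      if 0 ≤ beg then
        let e := beg + PySem.Str.len nsep
        (true, if beg < st.2.1 ∨ (beg = st.2.1 ∧ st.2.2 < e) then (beg, e) else st.2)
      else st) (false, (lenstr, 0))
    if st.1 then
      get_nosep_pos_loop instr not_separators lenstr fuel st.2.2 (nosep_pos ++ [st.2])
    else nosep_pos

def get_nosep_pos (instr : String) (not_separators : List String) : List (Int × Int) :=
  get_nosep_pos_loop instr not_separators (PySem.Str.len instr) (instr.toList.length + 1) 0 []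

-- ===== PORT B =====
-- best = longest not-separator starting at position i (0 if none);
-- instr.startswith(nsep, i) with 0 ≤ i is exactly the prefix test on (toList.drop i)
def get_nosep_pos_best (s : List Char) (not_separators : List (List Char)) (i : Nat) : Nat :=
  not_separators.foldl (fun best nsep =>
    if best < nsep.length ∧ PySem.Chars.startswith (s.drop i) nsep = true then nsep.length
    else best) 0

-- the 'while i < n' scan of Source B
def get_nosep_pos_scan (s : List Char) (not_separators : List (List Char)) (i : Nat) :
    List (Int × Int) :=
  if h : i < s.length then
    if hb : get_nosep_pos_best s not_separators i ≠ 0 then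
      ((i : Int), (i : Int) + (get_nosep_pos_best s not_separators i : Int)) ::
        get_nosep_pos_scan s not_separators (i + get_nosep_pos_best s not_separators i)
    else get_nosep_pos_scan s not_separators (i + 1)
  else []
termination_by s.length - i
decreasing_by all_goals omega

def get_nosep_pos_alt (instr : String) (not_separators : List String) : List (Int × Int) :=
  get_nosep_pos_scan instr.toList (not_separators.map String.toList) 0

-- ===== PRECONDITION & SPEC =====
-- Pre_ excludes only inputs whose not-separator list contains the empty string: there A
-- never returns (str.find('', start) always succeeds at start ≤ len, so the loop runs forever).
def Pre_get_nosep_pos (instr : String) (not_separators : List String) : Prop :=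
  "" ∉ not_separators
instance (instr : String) (not_separators : List String) : Decidable (Pre_get_nosep_pos instr not_separators) := by unfold Pre_get_nosep_pos; infer_instance

def pvWitness_get_nosep_pos : String × List String := ("a b,cd", ["a", "cd", "b,c"])

def Spec_get_nosep_pos (instr : String) (not_separators : List String) (out : List (Int × Int)) : Prop := out = get_nosep_pos_alt instr not_separators
instance (instr : String) (not_separators : List String) (out : List (Int × Int)) : Decidable (Spec_get_nosep_pos instr not_separators out) := by unfold Spec_get_nosep_pos; infer_instance

-- ===== CLAIM (what is proved, stated in full; the proofs are below) =====
def Claim_equal_get_nosep_pos : Prop := ∀ (instr : String) (not_separators : List String), Dom_get_nosep_pos instr not_separators → Pre_get_nosep_pos instr not_separators → Spec_get_nosep_pos instr not_separators (get_nosep_pos instr not_separators)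

-- ===== LEMMAS AND PROOFS =====

-- proof-side view of one round of A's inner for-loop: the candidate produced by one pattern
def pvCand (s : List Char) (k : Int) (p : List Char) : Option (Int × Int) :=
  if 0 ≤ PySem.Chars.findFrom s p k then
    some (PySem.Chars.findFrom s p k, PySem.Chars.findFrom s p k + p.length)
  else none

-- the conditional update A performs on nsep_pos
def pvUpd (be c : Int × Int) : Int × Int :=
  if c.1 < be.1 ∨ (c.1 = be.1 ∧ be.2 < c.2) then c else be

-- 'r is at least as good as c' in A's order: smaller begin, at ties larger end
def pvBeats (r c : Int × Int) : Prop := r.1 ≤ c.1 ∧ (r.1 = c.1 → c.2 ≤ r.2)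

theorem pvBeats_refl (r : Int × Int) : pvBeats r r := ⟨le_refl _, fun _ => le_refl _⟩

theorem pvBeats_trans {a b c : Int × Int} (h1 : pvBeats a b) (h2 : pvBeats b c) : pvBeats a c := by
  obtain ⟨h11, h12⟩ := h1; obtain ⟨h21, h22⟩ := h2
  exact ⟨le_trans h11 h21, fun he => by
    have hb : a.1 = b.1 := le_antisymm h11 (by omega)
    exact le_trans (h22 (by omega)) (h12 hb)⟩

theorem pvUpd_dom_left (b c : Int × Int) : pvBeats (pvUpd b c) b := by
  unfold pvUpd pvBeats; split_ifs with h
  · constructor <;> omega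
  · exact ⟨le_refl _, fun _ => le_refl _⟩

theorem pvUpd_dom_right (b c : Int × Int) : pvBeats (pvUpd b c) c := by
  unfold pvUpd pvBeats; split_ifs with h
  · exact ⟨le_refl _, fun _ => le_refl _⟩
  · constructor <;> omega

-- A's inner for-loop at Chars level: (did any pattern match, fold of pvUpd over candidates)
theorem foldC_eq (s : List Char) (k : Int) :
    ∀ (l : List (List Char)) (f0 : Bool) (be0 : Int × Int),
    l.foldl (fun (st : Bool × (Int × Int)) p =>
      if 0 ≤ PySem.Chars.findFrom s p k then
        (true, pvUpd st.2 (PySem.Chars.findFrom s p k,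
                           PySem.Chars.findFrom s p k + (p.length : Int)))
      else st) (f0, be0)
    = (f0 || l.any (fun p => (pvCand s k p).isSome),
       (l.filterMap (pvCand s k)).foldl pvUpd be0) := by
  intro l
  induction l with
  | nil => intro f0 be0; simp
  | cons q l ih =>
    intro f0 be0
    by_cases hq : 0 ≤ PySem.Chars.findFrom s q k
    · simp [ih, pvCand, hq]
    · simp [ih, pvCand, hq]

-- A's fold over the pattern strings is exactly foldC_eq's fold on the toLists
theorem foldA_eq (instr : String) (k : Int) (l : List String) (f0 : Bool) (be0 : Int × Int) :
    l.foldl (fun (st : Bool × (Int × Int)) nsep =>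
      let beg := PySem.Str.findFrom instr nsep k
      if 0 ≤ beg then
        let e := beg + PySem.Str.len nsep
        (true, if beg < st.2.1 ∨ (beg = st.2.1 ∧ st.2.2 < e) then (beg, e) else st.2)
      else st) (f0, be0)
    = (f0 || (l.map String.toList).any (fun p => (pvCand instr.toList k p).isSome),
       ((l.map String.toList).filterMap (pvCand instr.toList k)).foldl pvUpd be0) := by
  rw [← foldC_eq instr.toList k (l.map String.toList) f0 be0, List.foldl_map]
  congr 1

-- fold of pvUpd: result is the accumulator or one of the candidates …
theorem updFold_mem : ∀ (cs : List (Int × Int)) (be0 : Int × Int),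
    cs.foldl pvUpd be0 = be0 ∨ cs.foldl pvUpd be0 ∈ cs := by
  intro cs
  induction cs with
  | nil => intro be0; left; rfl
  | cons c cs ih =>
    intro be0
    simp only [List.foldl_cons]
    rcases ih (pvUpd be0 c) with h | h
    · rw [h]; unfold pvUpd; split_ifs
      · right; simp
      · left; rfl
    · right; simp [h]

-- … and it dominates the accumulator and every candidate
theorem updFold_dom : ∀ (cs : List (Int × Int)) (be0 : Int × Int),
    ∀ c ∈ be0 :: cs, pvBeats (cs.foldl pvUpd be0) c := by
  intro cs
  induction cs with
  | nil => intro be0 c hc; simp at hc; subst hc; exact pvBeats_refl _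
  | cons c' cs ih =>
    intro be0 c hc
    simp only [List.foldl_cons]
    rcases List.mem_cons.mp hc with hc | hc
    · rw [hc]
      exact pvBeats_trans (ih (pvUpd be0 c') _ (List.mem_cons_self ..)) (pvUpd_dom_left _ _)
    · rcases List.mem_cons.mp hc with hc | hc
      · rw [hc]
        exact pvBeats_trans (ih (pvUpd be0 c') _ (List.mem_cons_self ..)) (pvUpd_dom_right _ _)
      · exact ih (pvUpd be0 c') _ (List.mem_cons_of_mem _ hc)

-- the fold computing best: lower bound, upper bound, attainment
theorem bestFold (s : List Char) (i : Nat) :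
    ∀ (pats : List (List Char)) (b0 : Nat),
    b0 ≤ pats.foldl (fun best nsep =>
        if best < nsep.length ∧ PySem.Chars.startswith (s.drop i) nsep = true then nsep.length
        else best) b0
    ∧ (∀ p ∈ pats, PySem.Chars.startswith (s.drop i) p = true →
        p.length ≤ pats.foldl (fun best nsep =>
          if best < nsep.length ∧ PySem.Chars.startswith (s.drop i) nsep = true then nsep.length
          else best) b0)
    ∧ (pats.foldl (fun best nsep =>
        if best < nsep.length ∧ PySem.Chars.startswith (s.drop i) nsep = true then nsep.length
        else best) b0 = b0
      ∨ ∃ p ∈ pats, PySem.Chars.startswith (s.drop i) p = true ∧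
          p.length = pats.foldl (fun best nsep =>
            if best < nsep.length ∧ PySem.Chars.startswith (s.drop i) nsep = true then nsep.length
            else best) b0) := by
  intro pats
  induction pats with
  | nil => intro b0; refine ⟨le_refl _, by simp, Or.inl rfl⟩
  | cons q pats ih =>
    intro b0
    simp only [List.foldl_cons]
    by_cases hq : b0 < q.length ∧ PySem.Chars.startswith (s.drop i) q = true
    · obtain ⟨h1, h2, h3⟩ := ih q.length
      rw [if_pos hq]
      refine ⟨le_trans (le_of_lt hq.1) h1, ?_, ?_⟩
      · intro p hp hsw
        rcases List.mem_cons.mp hp with hp | hp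
        · subst hp; exact h1
        · exact h2 p hp hsw
      · rcases h3 with h3 | ⟨p, hp, hsw, hlen⟩
        · exact Or.inr ⟨q, List.mem_cons_self .., hq.2, h3.symm ▸ rfl⟩
        · exact Or.inr ⟨p, List.mem_cons_of_mem _ hp, hsw, hlen⟩
    · obtain ⟨h1, h2, h3⟩ := ih b0
      rw [if_neg hq]
      refine ⟨h1, ?_, ?_⟩
      · intro p hp hsw
        rcases List.mem_cons.mp hp with hp | hp
        · subst hp
          rcases Nat.lt_or_ge b0 p.length with hlt | hge
          · exact absurd ⟨hlt, hsw⟩ hq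
          · exact le_trans hge h1
        · exact h2 p hp hsw
      · rcases h3 with h3 | ⟨p, hp, hsw, hlen⟩
        · exact Or.inl h3
        · exact Or.inr ⟨p, List.mem_cons_of_mem _ hp, hsw, hlen⟩

theorem best_ge (s : List Char) (pats : List (List Char)) (i : Nat) {p : List Char}
    (hp : p ∈ pats) (hpre : p <+: s.drop i) : p.length ≤ get_nosep_pos_best s pats i :=
  (bestFold s i pats 0).2.1 p hp ((PySem.Chars.startswith_iff _ _).mpr hpre)

theorem best_attained (s : List Char) (pats : List (List Char)) (i : Nat)
    (h : get_nosep_pos_best s pats i ≠ 0) :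
    ∃ p ∈ pats, p <+: s.drop i ∧ p.length = get_nosep_pos_best s pats i := by
  rcases (bestFold s i pats 0).2.2 with h0 | ⟨p, hp, hsw, hlen⟩
  · exact absurd h0 h
  · exact ⟨p, hp, (PySem.Chars.startswith_iff _ _).mp hsw, hlen⟩

theorem best_zero_of_no_match (s : List Char) (pats : List (List Char)) (i : Nat)
    (h : ∀ p ∈ pats, ¬ p <+: s.drop i) : get_nosep_pos_best s pats i = 0 := by
  rcases (bestFold s i pats 0).2.2 with h0 | ⟨p, hp, hsw, _⟩
  · exact h0
  · exact absurd ((PySem.Chars.startswith_iff _ _).mp hsw) (h p hp)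

-- scan unfolding lemmas
theorem scan_of_ge (s : List Char) (pats : List (List Char)) (i : Nat) (h : ¬ i < s.length) :
    get_nosep_pos_scan s pats i = [] := by
  rw [get_nosep_pos_scan]; simp [h]

theorem scan_of_zero (s : List Char) (pats : List (List Char)) (i : Nat) (h : i < s.length)
    (hb : get_nosep_pos_best s pats i = 0) :
    get_nosep_pos_scan s pats i = get_nosep_pos_scan s pats (i + 1) := by
  rw [get_nosep_pos_scan]; simp [h, hb]

theorem scan_of_pos (s : List Char) (pats : List (List Char)) (i : Nat) (h : i < s.length)
    (hb : get_nosep_pos_best s pats i ≠ 0) :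
    get_nosep_pos_scan s pats i =
      ((i : Int), (i : Int) + (get_nosep_pos_best s pats i : Int)) ::
        get_nosep_pos_scan s pats (i + get_nosep_pos_best s pats i) := by
  rw [get_nosep_pos_scan]; simp [h, hb]

-- a prefix of a later suffix is an infix of an earlier one
theorem prefix_drop_infix (s p : List Char) (k j : Nat) (hkj : k ≤ j) (h : p <+: s.drop j) :
    p <:+: s.drop k := by
  have : s.drop j = (s.drop k).drop (j - k) := by rw [List.drop_drop]; congr 1; omega
  exact (this ▸ h).isInfix.trans (List.drop_suffix _ _).isInfix

-- no pattern anywhere in the tail ⇒ the scan produces nothing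
theorem scan_nil (s : List Char) (pats : List (List Char)) :
    ∀ k, (∀ p ∈ pats, ¬ p <:+: s.drop k) → get_nosep_pos_scan s pats k = [] := by
  intro k
  induction hn : s.length - k using Nat.strong_induction_on generalizing k with
  | _ n ih =>
    intro hno
    by_cases hk : k < s.length
    · have hb : get_nosep_pos_best s pats k = 0 := by
        apply best_zero_of_no_match
        intro p hp hpre
        exact hno p hp hpre.isInfix
      rw [scan_of_zero s pats k hk hb]
      exact ih (s.length - (k + 1)) (by omega) (k + 1) rfl
        (fun p hp hinf => hno p hp (hinf.trans
          (by
            have : s.drop (k + 1) = (s.drop k).drop 1 := by rw [List.drop_drop]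
            exact this ▸ (List.drop_suffix _ _).isInfix)))
    · exact scan_of_ge s pats k hk

-- skipping zero-best positions: the scan from k reaches the span at m
theorem scan_reach (s : List Char) (pats : List (List Char)) :
    ∀ (d k m : Nat), m - k = d → k ≤ m → m < s.length → get_nosep_pos_best s pats m ≠ 0 →
    (∀ j, k ≤ j → j < m → get_nosep_pos_best s pats j = 0) →
    get_nosep_pos_scan s pats k =
      ((m : Int), (m : Int) + (get_nosep_pos_best s pats m : Int)) ::
        get_nosep_pos_scan s pats (m + get_nosep_pos_best s pats m) := by
  intro d
  induction d with
  | zero =>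
    intro k m hd hkm hm hb _
    have : k = m := by omega
    subst this
    exact scan_of_pos s pats k hm hb
  | succ d ih =>
    intro k m hd hkm hm hb hzero
    have hk : k < m := by omega
    rw [scan_of_zero s pats k (by omega) (hzero k (le_refl _) hk)]
    exact ih (k + 1) m (by omega) (by omega) hm hb (fun j hj1 hj2 => hzero j (by omega) hj2)

-- every candidate comes from a pattern via findFrom's specification
theorem cand_spec (s : List Char) (pats : List (List Char)) (k : Nat) (hk : k ≤ s.length)
    (hne : ∀ p ∈ pats, p ≠ []) {c : Int × Int}
    (hc : c ∈ pats.filterMap (pvCand s (k : Int))) :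
    ∃ p ∈ pats, (k : Int) ≤ c.1 ∧ c.2 = c.1 + p.length ∧ p <+: s.drop c.1.toNat ∧
      (∀ j : Nat, k ≤ j → j < c.1.toNat → ¬ p <+: s.drop j) ∧ p ≠ [] := by
  rcases List.mem_filterMap.mp hc with ⟨p, hp, hcand⟩
  unfold pvCand at hcand
  split_ifs at hcand with hge
  · injection hcand with hcand
    have hne' : PySem.Chars.findFrom s p (k : Int) ≠ -1 := by omega
    obtain ⟨h1, h2, h3⟩ := PySem.Chars.findFrom_natCast_spec s p k hk hne'
    subst hcand
    exact ⟨p, hp, h1, rfl, h2, fun j hj1 hj2 => h3 j hj1 hj2, hne p hp⟩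

-- a pattern matching at j ≥ k yields a candidate at position ≤ j
theorem match_cand (s : List Char) (pats : List (List Char)) (k : Nat) (hk : k ≤ s.length)
    {p : List Char} (hp : p ∈ pats) {j : Nat} (hj : k ≤ j) (hpre : p <+: s.drop j) :
    ∃ c ∈ pats.filterMap (pvCand s (k : Int)),
      c.1 ≤ (j : Int) ∧ c.2 = c.1 + p.length := by
  have hinf : p <:+: s.drop k := prefix_drop_infix s p k j hj hpre
  have hne' : PySem.Chars.findFrom s p (k : Int) ≠ -1 := by
    intro h
    exact ((PySem.Chars.findFrom_natCast_eq_neg_one_iff s p k hk).mp h) hinf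
  obtain ⟨h1, _, h3⟩ := PySem.Chars.findFrom_natCast_spec s p k hk hne'
  have hge : 0 ≤ PySem.Chars.findFrom s p (k : Int) := le_trans (by omega) h1
  refine ⟨(PySem.Chars.findFrom s p (k : Int),
           PySem.Chars.findFrom s p (k : Int) + p.length), ?_, ?_, rfl⟩
  · exact List.mem_filterMap.mpr ⟨p, hp, by unfold pvCand; rw [if_pos hge]⟩
  · by_contra hlt
    exact h3 j hj (by omega) hpre

-- characterisation of one round of A's for-loop (the fold over pvUpd candidates)
theorem roundA (s : List Char) (pats : List (List Char)) (k : Nat) (hk : k ≤ s.length)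
    (hne : ∀ p ∈ pats, p ≠ [])
    (hsome : pats.any (fun p => (pvCand s (k : Int) p).isSome) = true) :
    ∃ m : Nat, k ≤ m ∧ m < s.length ∧
      (pats.filterMap (pvCand s (k : Int))).foldl pvUpd ((s.length : Int), 0)
        = ((m : Int), (m : Int) + (get_nosep_pos_best s pats m : Int)) ∧
      get_nosep_pos_best s pats m ≠ 0 ∧ m + get_nosep_pos_best s pats m ≤ s.length ∧
      (∀ j, k ≤ j → j < m → get_nosep_pos_best s pats j = 0) := by
  set cs := pats.filterMap (pvCand s (k : Int)) with hcs
  set r := cs.foldl pvUpd ((s.length : Int), 0) with hr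
  -- a candidate exists
  obtain ⟨p0, hp0, hp0some⟩ := List.any_eq_true.mp hsome
  obtain ⟨c0, hc0⟩ := Option.isSome_iff_exists.mp hp0some
  have hc0mem : c0 ∈ cs := List.mem_filterMap.mpr ⟨p0, hp0, hc0⟩
  have hdom : ∀ c ∈ ((s.length : Int), (0 : Int)) :: cs, pvBeats r c := updFold_dom cs _
  -- candidates begin strictly before s.length
  have hlt : ∀ c ∈ cs, c.1 < (s.length : Int) ∧ (k : Int) ≤ c.1 := by
    intro c hc
    obtain ⟨p, hp, h1, h2, h3, _, hpne⟩ := cand_spec s pats k hk hne hc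
    have : p.length ≤ (s.drop c.1.toNat).length := h3.length_le
    have hplen : 1 ≤ p.length := by
      cases p with
      | nil => exact absurd rfl hpne
      | cons a l => simp
    simp only [List.length_drop] at this
    constructor <;> omega
  -- r is a candidate
  have hrmem : r ∈ cs := by
    rcases updFold_mem cs ((s.length : Int), 0) with h | h
    · exfalso
      have h1 := (hdom c0 (List.mem_cons_of_mem _ hc0mem)).1
      have h2 := (hlt c0 hc0mem).1
      have hrfst : r.1 = ((s.length : Int), (0 : Int)).1 := by rw [hr, h]
      simp only at hrfst
      omega
    · exact h
  obtain ⟨pr, hpr, hr1, hr2, hr3, hr4, hprne⟩ := cand_spec s pats k hk hne hrmem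
  have hr0 : 0 ≤ r.1 := le_trans (by omega) hr1
  set m := r.1.toNat with hm
  have hrm : r.1 = (m : Int) := by omega
  have hprlen : 1 ≤ pr.length := by
    cases pr with
    | nil => exact absurd rfl hprne
    | cons a l => simp
  have hmlt : m < s.length := by
    have := hr3.length_le
    simp only [List.length_drop] at this
    omega
  -- no pattern matches strictly before m
  have hnomatch : ∀ j, k ≤ j → j < m → ∀ q ∈ pats, ¬ q <+: s.drop j := by
    intro j hj1 hj2 q hq hqpre
    obtain ⟨c, hcmem, hc1, _⟩ := match_cand s pats k hk hq hj1 hqpre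
    have := (hdom c (List.mem_cons_of_mem _ hcmem)).1
    omega
  -- every pattern matching at m is no longer than pr
  have hmax : ∀ q ∈ pats, q <+: s.drop m → q.length ≤ pr.length := by
    intro q hq hqpre
    obtain ⟨c, hcmem, hc1, hc2⟩ := match_cand s pats k hk hq (by omega) hqpre
    have hd := hdom c (List.mem_cons_of_mem _ hcmem)
    have hceq : c.1 = r.1 := by have := hd.1; omega
    have := hd.2 hceq.symm
    omega
  -- best at m equals pr.length
  have hbest : get_nosep_pos_best s pats m = pr.length := by
    have hle : pr.length ≤ get_nosep_pos_best s pats m := best_ge s pats m hpr hr3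
    have hne0 : get_nosep_pos_best s pats m ≠ 0 := by omega
    obtain ⟨q, hq, hqpre, hqlen⟩ := best_attained s pats m hne0
    have := hmax q hq hqpre
    omega
  refine ⟨m, by omega, hmlt, ?_, by omega, ?_, ?_⟩
  · rw [Prod.ext_iff]
    exact ⟨hrm, by rw [hr2, hrm, hbest]⟩
  · have := hr3.length_le
    simp only [List.length_drop] at this
    omega
  · intro j hj1 hj2
    exact best_zero_of_no_match s pats j (hnomatch j hj1 hj2)

-- pvCand is some iff the pattern occurs in the tail
theorem cand_isSome_iff (s : List Char) (p : List Char) (k : Nat) (hk : k ≤ s.length) :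
    (pvCand s (k : Int) p).isSome = true ↔ p <:+: s.drop k := by
  unfold pvCand
  constructor
  · intro h
    split_ifs at h with hge
    · have hne' : PySem.Chars.findFrom s p (k : Int) ≠ -1 := by omega
      by_contra hno
      exact hne' ((PySem.Chars.findFrom_natCast_eq_neg_one_iff s p k hk).mpr hno)
    · simp at h
  · intro hinf
    have hne' : PySem.Chars.findFrom s p (k : Int) ≠ -1 := by
      intro h
      exact ((PySem.Chars.findFrom_natCast_eq_neg_one_iff s p k hk).mp h) hinf
    obtain ⟨h1, _, _⟩ := PySem.Chars.findFrom_natCast_spec s p k hk hne'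
    rw [if_pos (le_trans (by omega) h1)]
    rfl

-- MAIN: the fuelled loop of A from start = k equals the scan of B from k
theorem loop_eq_scan (instr : String) (not_separators : List String)
    (hne : ∀ p ∈ not_separators.map String.toList, p ≠ []) :
    ∀ (fuel k : Nat) (acc : List (Int × Int)), k ≤ instr.toList.length →
    instr.toList.length + 1 - k ≤ fuel →
    get_nosep_pos_loop instr not_separators ((instr.toList.length : Int)) fuel (k : Int) acc
      = acc ++ get_nosep_pos_scan instr.toList (not_separators.map String.toList) k := by
  intro fuel
  induction fuel with
  | zero => intro k acc hk hfuel; omega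
  | succ fuel ih =>
    intro k acc hk hfuel
    set s := instr.toList with hs
    set pats := not_separators.map String.toList with hpats
    rw [get_nosep_pos_loop]
    simp only [foldA_eq instr (k : Int) not_separators, Bool.false_or, ← hs, ← hpats]
    by_cases hany : pats.any (fun p => (pvCand s (k : Int) p).isSome) = true
    · obtain ⟨m, hkm, hmlt, hfold, hb, hble, hzero⟩ := roundA s pats k hk hne hany
      rw [if_pos hany, hfold]
      have hproj : ((((m : Int), (m : Int) + (get_nosep_pos_best s pats m : Int)) : Int × Int)).2
          = ((m + get_nosep_pos_best s pats m : Nat) : Int) := by push_cast; ring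
      rw [hproj]
      rw [ih (m + get_nosep_pos_best s pats m) _ hble (by omega)]
      rw [scan_reach s pats (m - k) k m (by omega) hkm hmlt hb hzero]
      simp
    · rw [if_neg hany]
      rw [scan_nil s pats k (fun p hp hinf => by
        have := (cand_isSome_iff s p k hk).mpr hinf
        exact hany (List.any_eq_true.mpr ⟨p, hp, this⟩))]
      simp

-- ===== VERDICT (by name: the statement is the Claim_ definition above) =====
theorem get_nosep_pos_spec : Claim_equal_get_nosep_pos := by
  intro instr not_separators _ hpre
  unfold Spec_get_nosep_pos get_nosep_pos get_nosep_pos_alt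
  have hne : ∀ p ∈ not_separators.map String.toList, p ≠ [] := by
    intro p hp
    rcases List.mem_map.mp hp with ⟨q, hq, rfl⟩
    intro h
    exact hpre (String.toList_eq_nil_iff.mp h ▸ hq)
  rw [PySem.Str.len_eq]
  have hmain := loop_eq_scan instr not_separators hne (instr.toList.length + 1) 0 []
    (by omega) (by omega)
  simpa using hmain
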